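-- pv_equiv track=rewrite | github.com/Frunnze/AA_Laboratories | AA-lab-3-Eratosthenes-Sieve/sieve_algorithms.py | alg_2
-- ===== SOURCE A (Python) =====
-- def alg_2(c):
--     c[0] = c[1] = False
--     i, n = 2, len(c) - 1
--     # Go trough each cell and mark the multiples.
--     while i <= n:
--         j = 2 * i
--         while j <= n:
--             c[j] = False
--             j += i
--         i += 1
--     return c
-- ===== SOURCE B (Python) =====
-- def alg_2(c):
--     # True Sieve of Eratosthenes on a fresh primality table: only prime i,
--     # start at i*i, stop at sqrt(n); then combine with the input values.
--     # (Does not mutate c, unlike A, which mutates and returns c itself.)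
--     n = len(c) - 1
--     prime = [True] * (n + 1)
--     i = 2
--     while i * i <= n:
--         if prime[i]:
--             for j in range(i * i, n + 1, i):
--                 prime[j] = False
--         i += 1
--     return [x and prime[k] and k >= 2 for k, x in enumerate(c)]
-- ===== Notes on version B (the rewrite author's own statement) =====
-- stated objective: faster
-- what changed: A marks the multiples of every i in [2,n] starting at 2i; B builds a true Sieve of Eratosthenes on a fresh table (only prime i, starting at i*i, stopping at i*i>n) and combines it with the input by one comprehension, without mutating c.
import Mathlib
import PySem

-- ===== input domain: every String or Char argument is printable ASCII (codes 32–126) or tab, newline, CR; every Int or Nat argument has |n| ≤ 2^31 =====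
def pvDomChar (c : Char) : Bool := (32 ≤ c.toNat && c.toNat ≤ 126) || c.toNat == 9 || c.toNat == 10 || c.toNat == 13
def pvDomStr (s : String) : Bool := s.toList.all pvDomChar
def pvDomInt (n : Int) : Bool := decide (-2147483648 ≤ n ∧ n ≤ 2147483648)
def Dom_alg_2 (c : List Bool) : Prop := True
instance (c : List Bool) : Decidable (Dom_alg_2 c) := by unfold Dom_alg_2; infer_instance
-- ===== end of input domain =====

-- B replaces A's mark-the-multiples-of-every-i pass by a true Sieve of Eratosthenes (only prime i,
-- start at i*i, stop once i*i > n) on a fresh table combined with the input in one comprehension;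
-- A mutates and returns its argument while B builds a new list, so the equivalence proved here is
-- about the return value only.

-- ===== PORT A =====
-- inner while: 'while j <= n: c[j] = False; j += i'
def alg2InnerA (n i : Nat) (j : Nat) (c : List Bool) : List Bool :=
  if _h : j ≤ n then
    if _hi : i = 0 then c   -- unreachable totality guard: A only runs this loop with i ≥ 2
    else alg2InnerA n i (j + i) (c.set j false)
  else c
termination_by n + 1 - j
decreasing_by omega

-- outer while: 'while i <= n: (inner loop with j = 2*i); i += 1'
def alg2OuterA (n i : Nat) (c : List Bool) : List Bool :=
  if _h : i ≤ n then alg2OuterA n (i + 1) (alg2InnerA n i (2 * i) c) else c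
termination_by n + 1 - i

def alg_2 (c : List Bool) : List Bool :=
  -- c[0] = c[1] = False (IndexError for len(c) < 2 is excluded by Pre_; List.set is a no-op there)
  alg2OuterA (c.length - 1) 2 ((c.set 0 false).set 1 false)

-- ===== PORT B =====
-- 'for j in range(i*i, n+1, i): prime[j] = False'
def alg2MarkB (n : Int) (i : Nat) (p : List Bool) : List Bool :=
  (PySem.List.pyRange ((i : Int) * i) (n + 1) i).foldl (fun p j => p.set j.toNat false) p

-- 'while i*i <= n: if prime[i]: (mark the multiples); i += 1'
def alg2SieveB (n : Int) (i : Nat) (p : List Bool) : List Bool :=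
  if _h : ((i : Int) * i) ≤ n then
    alg2SieveB n (i + 1) (if p.getD i true then alg2MarkB n i p else p)
  else p
termination_by (n + 1 - i).toNat
decreasing_by
  have hii : (i : Int) ≤ (i : Int) * i := by nlinarith [sq_nonneg ((i : Int) - 1)]
  omega

-- 'return [x and prime[k] and k >= 2 for k, x in enumerate(c)]'
def alg_2_alt (c : List Bool) : List Bool :=
  let n : Int := (c.length : Int) - 1
  let p := alg2SieveB n 2 (List.replicate (n + 1).toNat true)
  (PySem.List.enumerate c 0).map (fun kx => kx.2 && p.getD kx.1.toNat true && decide ((2 : Int) ≤ kx.1))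

-- ===== PRECONDITION & SPEC =====
-- Pre_ excludes exactly the lists of length < 2, on which A's 'c[0] = c[1] = False' raises IndexError.
def Pre_alg_2 (c : List Bool) : Prop := 2 ≤ c.length
instance (c : List Bool) : Decidable (Pre_alg_2 c) := by unfold Pre_alg_2; infer_instance
def pvWitness_alg_2 : List Bool := [true, true, true, true, true]

def Spec_alg_2 (c : List Bool) (out : List Bool) : Prop := out = alg_2_alt c
instance (c : List Bool) (out : List Bool) : Decidable (Spec_alg_2 c out) := by unfold Spec_alg_2; infer_instance

-- ===== CLAIM (what is proved, stated in full; the proofs are below) =====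
def Claim_equal_alg_2 : Prop := ∀ (c : List Bool), Dom_alg_2 c → Pre_alg_2 c → Spec_alg_2 c (alg_2 c)

-- ===== LEMMAS AND PROOFS =====

-- "k is marked false by A's pass": some divisor d ≥ 2 with 2*d ≤ k
def pvAComp (k : Nat) : Bool := decide (∃ d, d < k ∧ 2 ≤ d ∧ 2 * d ≤ k ∧ d ∣ k)
-- "k is marked false by B's sieve": some prime q with q*q ≤ k dividing k
def pvPComp (k : Nat) : Bool := decide (∃ q, q < k ∧ q.Prime ∧ q * q ≤ k ∧ q ∣ k)
-- B's sieve state before iteration i: marked exactly by the primes < i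
def pvBM (i k : Nat) : Bool := decide (∃ q, q < i ∧ q.Prime ∧ q * q ≤ k ∧ q ∣ k)

theorem alg2InnerA_length (n i j : Nat) (xs : List Bool) :
    (alg2InnerA n i j xs).length = xs.length := by
  fun_induction alg2InnerA with
  | case1 => rfl
  | case2 j xs h hi ih => simpa using ih
  | case3 => rfl


theorem alg2InnerA_getElem? (n i : Nat) (hi : 2 ≤ i) (j : Nat) (xs : List Bool) (k : Nat) :
    (alg2InnerA n i j xs)[k]? =
      if j ≤ k ∧ k ≤ n ∧ i ∣ (k - j) then xs[k]?.map (fun _ => false) else xs[k]? := by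
  fun_induction alg2InnerA with
  | case1 j xs h hi' => omega
  | case2 j xs h hi' ih =>
    rw [ih]
    by_cases hkj : k = j
    · subst hkj
      have h1 : ¬ (k + i ≤ k ∧ k ≤ n ∧ i ∣ (k - (k + i))) := by omega
      have h2 : k ≤ k ∧ k ≤ n ∧ i ∣ (k - k) := ⟨le_refl _, h, by simp⟩
      rw [if_neg h1, if_pos h2]
      by_cases hlt : k < xs.length
      · rw [List.getElem?_set_self hlt]
        simp [List.getElem?_eq_getElem hlt]
      · rw [List.getElem?_set]
        simp [List.getElem?_eq_none (by omega : xs.length ≤ k)]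
        omega
      -- may need fixing
    · rw [List.getElem?_set_ne (by omega : j ≠ k)]
      congr 1
      apply propext
      constructor
      · rintro ⟨h1, h2, h3⟩
        refine ⟨by omega, h2, ?_⟩
        have : k - j = (k - (j + i)) + i := by omega
        rw [this]; exact Nat.dvd_add h3 ⟨1, by ring⟩
      · rintro ⟨h1, h2, h3⟩
        have hkj' : j < k := by omega
        have hik : i ≤ k - j := Nat.le_of_dvd (by omega) h3
        refine ⟨by omega, h2, ?_⟩
        have : k - (j + i) = (k - j) - i := by omega
        rw [this]
        exact Nat.dvd_sub h3 dvd_rfl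
  | case3 j xs h =>
    have : ¬ (j ≤ k ∧ k ≤ n ∧ i ∣ (k - j)) := by omega
    rw [if_neg this]

theorem alg2OuterA_length (n i : Nat) (xs : List Bool) :
    (alg2OuterA n i xs).length = xs.length := by
  fun_induction alg2OuterA with
  | case1 i xs h ih => rw [ih, alg2InnerA_length]
  | case2 => rfl


theorem alg2OuterA_getElem? (n i : Nat) (hi : 2 ≤ i) (xs : List Bool) (k : Nat) (hk : k ≤ n) :
    (alg2OuterA n i xs)[k]? =
      if ∃ d, d < k ∧ i ≤ d ∧ 2 * d ≤ k ∧ d ∣ k then xs[k]?.map (fun _ => false) else xs[k]? := by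
  rw [alg2OuterA]
  split
  · next h =>
    rw [alg2OuterA_getElem? n (i+1) (by omega) _ k hk,
        alg2InnerA_getElem? n i hi (2*i) xs k]
    have hm : (xs[k]?.map (fun _ => false)).map (fun _ : Bool => false) = xs[k]?.map (fun _ => false) := by
      cases xs[k]? <;> rfl
    have hiff : (∃ d, d < k ∧ i ≤ d ∧ 2 * d ≤ k ∧ d ∣ k) ↔
        ((2*i ≤ k ∧ k ≤ n ∧ i ∣ (k - 2*i)) ∨ (∃ d, d < k ∧ i + 1 ≤ d ∧ 2 * d ≤ k ∧ d ∣ k)) := by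
      constructor
      · rintro ⟨d, h1, h2, h3, h4⟩
        rcases eq_or_lt_of_le h2 with heq | hlt
        · subst heq
          exact Or.inl ⟨h3, hk, Nat.dvd_sub h4 ⟨2, by ring⟩⟩
        · exact Or.inr ⟨d, h1, hlt, h3, h4⟩
      · rintro (⟨h1, h2, h3⟩ | ⟨d, h1, h2, h3, h4⟩)
        · refine ⟨i, by omega, le_refl _, h1, ?_⟩
          have : k = (k - 2*i) + 2*i := by omega
          rw [this]
          exact Nat.dvd_add h3 ⟨2, by ring⟩
        · exact ⟨d, h1, by omega, h3, h4⟩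
    by_cases hB : 2*i ≤ k ∧ k ≤ n ∧ i ∣ (k - 2*i) <;>
      by_cases hC : ∃ d, d < k ∧ i + 1 ≤ d ∧ 2 * d ≤ k ∧ d ∣ k <;>
      simp only [if_pos, hB, hC, hiff, or_true, or_self, if_false] <;> simp [hm]
  · next h =>
    rw [if_neg]
    rintro ⟨d, h1, h2, h3, h4⟩
    omega
termination_by n + 1 - i

theorem foldl_set_false_length (L : List Int) (p : List Bool) :
    (L.foldl (fun p j => p.set j.toNat false) p).length = p.length := by
  induction L generalizing p with
  | nil => rfl
  | cons j L ih => simp [List.foldl_cons, ih]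


theorem foldl_set_false_getElem? (L : List Int) (p : List Bool) (k : Nat) (hL : ∀ j ∈ L, 0 ≤ j) :
    (L.foldl (fun p j => p.set j.toNat false) p)[k]? =
      if (k : Int) ∈ L then p[k]?.map (fun _ => false) else p[k]? := by
  induction L generalizing p with
  | nil => simp
  | cons j L ih =>
    rw [List.foldl_cons, ih _ (fun x hx => hL x (List.mem_cons_of_mem _ hx))]
    have hj : (0:Int) ≤ j := hL j (List.mem_cons_self ..)
    by_cases hkj : (k : Int) = j
    · rw [show j.toNat = k from by omega]
      by_cases hmem : (k:Int) ∈ L <;>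
        · rw [List.getElem?_set_self']
          simp [List.mem_cons, hkj, Option.map_map, Function.comp_def, Function.const_def,
            Option.map_eq_map]
    · have : j.toNat ≠ k := by omega
      rw [List.getElem?_set_ne this]
      simp [List.mem_cons, hkj]

theorem alg2MarkB_length (n : Int) (i : Nat) (p : List Bool) :
    (alg2MarkB n i p).length = p.length := by
  rw [alg2MarkB, foldl_set_false_length]


theorem alg2MarkB_getElem? (n : Int) (i : Nat) (hi : 2 ≤ i) (p : List Bool) (k : Nat) :
    (alg2MarkB n i p)[k]? =
      if i * i ≤ k ∧ (k : Int) ≤ n ∧ i ∣ k then p[k]?.map (fun _ => false) else p[k]? := by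
  have hpos : (0:Int) < (i:Int) := by exact_mod_cast Nat.lt_of_lt_of_le (by norm_num) hi
  rw [alg2MarkB, foldl_set_false_getElem?]
  · congr 1
    rw [PySem.List.mem_pyRange_iff_of_pos hpos]
    apply propext
    constructor
    · rintro ⟨h1, h2, h3⟩
      refine ⟨by exact_mod_cast h1, by omega, ?_⟩
      have : (i:Int) ∣ (k:Int) := by
        have : (k:Int) = ((k:Int) - i*i) + i*i := by ring
        rw [this]
        exact dvd_add h3 ⟨i, rfl⟩
      exact_mod_cast this
    · rintro ⟨h1, h2, h3⟩
      refine ⟨by exact_mod_cast h1, by omega, ?_⟩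
      have h3' : (i:Int) ∣ (k:Int) := by exact_mod_cast h3
      exact dvd_sub h3' ⟨i, rfl⟩
  · intro j hj
    have := (PySem.List.mem_pyRange_iff_of_pos hpos j).1 hj
    have : (0:Int) ≤ (i:Int)*i := by positivity
    omega

theorem alg2SieveB_length (n : Int) (i : Nat) (p : List Bool) :
    (alg2SieveB n i p).length = p.length := by
  fun_induction alg2SieveB with
  | case1 i p h ih => simp only [dite_eq_ite] at ih; rw [ih]; split <;> simp [alg2MarkB_length]
  | case2 => rfl


theorem alg2SieveB_getElem? (n : Int) (i : Nat) (hi : 2 ≤ i) (p : List Bool)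
    (hlen : (p.length : Int) = n + 1)
    (hp : ∀ k, k < p.length → p[k]? = some (!pvBM i k)) :
    ∀ k, k < p.length → (alg2SieveB n i p)[k]? = some (!pvPComp k) := by
  intro k hk
  rw [alg2SieveB]
  split
  · next h =>
    have hii : (i : Int) ≤ (i : Int) * i := by nlinarith [sq_nonneg ((i : Int) - 1)]
    have hilen : i < p.length := by omega
    have hgd : p.getD i true = !pvBM i i := by
      rw [List.getD_eq_getElem?_getD, hp i hilen]; rfl
    set p' : List Bool := if p.getD i true then alg2MarkB n i p else p with hp'def
    have hlen' : p'.length = p.length := by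
      rw [hp'def]; split <;> simp [alg2MarkB_length]
    have hp' : ∀ k', k' < p'.length → p'[k']? = some (!pvBM (i+1) k') := by
      intro k' hk'
      rw [hlen'] at hk'
      have hk'n : (k' : Int) ≤ n := by omega
      by_cases hpr : i.Prime
      · have hBMii : pvBM i i = false := by
          simp only [pvBM, decide_eq_false_iff_not]
          rintro ⟨q, hq1, hq2, hq3, hq4⟩
          rcases (Nat.Prime.eq_one_or_self_of_dvd hpr q hq4) with rfl | rfl
          · exact Nat.Prime.one_lt hq2 |>.false
          · omega
        rw [hp'def, hgd, hBMii]
        simp only [Bool.not_false, if_true]  -- reduce the branch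
        rw [alg2MarkB_getElem? n i hi p k', hp k' hk']
        by_cases hc : i * i ≤ k' ∧ (k' : Int) ≤ n ∧ i ∣ k'
        · rw [if_pos hc]
          have : pvBM (i+1) k' = true := by
            simp only [pvBM, decide_eq_true_eq]
            exact ⟨i, by omega, hpr, hc.1, hc.2.2⟩
          rw [this]; rfl
        · rw [if_neg hc]
          congr 2
          simp only [pvBM, decide_eq_decide]
          constructor
          · rintro ⟨q, hq1, hq2, hq3, hq4⟩; exact ⟨q, by omega, hq2, hq3, hq4⟩
          · rintro ⟨q, hq1, hq2, hq3, hq4⟩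
            refine ⟨q, ?_, hq2, hq3, hq4⟩
            rcases Nat.lt_succ_iff_lt_or_eq.1 hq1 with h' | rfl
            · exact h'
            · exact absurd ⟨hq3, hk'n, hq4⟩ hc
      · have hBMii : pvBM i i = true := by
          simp only [pvBM, decide_eq_true_eq]
          have h0 : 0 < i := by omega
          have hne1 : i ≠ 1 := by omega
          have hmf := Nat.minFac_prime hne1
          have hsq := Nat.minFac_sq_le_self h0 hpr
          have hdvd := Nat.minFac_dvd i
          have hlt : i.minFac < i := by
            rcases Nat.lt_or_ge i.minFac i with h' | h'
            · exact h'
            · have : i.minFac = i := le_antisymm (Nat.le_of_dvd h0 hdvd) h'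
              rw [this] at hmf; exact absurd hmf hpr
          exact ⟨i.minFac, hlt, hmf, by nlinarith [hsq], hdvd⟩
        rw [hp'def, hgd, hBMii]
        simp only [Bool.not_true, Bool.false_eq_true, if_false]
        rw [hp k' hk']
        congr 2
        simp only [pvBM, decide_eq_decide]
        constructor
        · rintro ⟨q, hq1, hq2, hq3, hq4⟩; exact ⟨q, by omega, hq2, hq3, hq4⟩
        · rintro ⟨q, hq1, hq2, hq3, hq4⟩
          refine ⟨q, ?_, hq2, hq3, hq4⟩
          rcases Nat.lt_succ_iff_lt_or_eq.1 hq1 with h' | rfl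
          · exact h'
          · exact absurd hq2 hpr
    exact alg2SieveB_getElem? n (i+1) (by omega) p' (by rw [hlen']; exact hlen) hp' k (by omega)
  · next h =>
    rw [hp k hk]
    congr 2
    simp only [pvBM, pvPComp, decide_eq_decide]
    have hkn : (k : Int) ≤ n := by omega
    constructor
    · rintro ⟨q, hq1, hq2, hq3, hq4⟩
      have h2q : 2 ≤ q := hq2.two_le
      exact ⟨q, by nlinarith, hq2, hq3, hq4⟩
    · rintro ⟨q, hq1, hq2, hq3, hq4⟩
      refine ⟨q, ?_, hq2, hq3, hq4⟩
      by_contra hqi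
      push Not at hqi
      have : (i:Int) * i ≤ (q:Int) * q := by
        have : (i:Int) ≤ q := by exact_mod_cast hqi
        nlinarith [le_trans (by norm_num : (0:Int) ≤ 2) (by exact_mod_cast hi : (2:Int) ≤ i)]
      have hq3' : (q:Int) * q ≤ k := by exact_mod_cast hq3
      omega
termination_by (n + 1 - i).toNat
decreasing_by
  have hii : (i : Int) ≤ (i : Int) * i := by nlinarith [sq_nonneg ((i : Int) - 1)]
  omega

theorem pvAComp_eq_pvPComp (k : Nat) : pvAComp k = pvPComp k := by
  simp only [pvAComp, pvPComp, decide_eq_decide]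
  constructor
  · rintro ⟨d, hd1, hd2, hd3, hd4⟩
    have hk0 : 0 < k := by omega
    have hnp : ¬ k.Prime := by
      intro hpk
      rcases (Nat.Prime.eq_one_or_self_of_dvd hpk d hd4) with rfl | rfl
      · omega
      · omega
    have hne1 : k ≠ 1 := by omega
    have hmf := Nat.minFac_prime hne1
    have hsq := Nat.minFac_sq_le_self hk0 hnp
    have h2q := hmf.two_le
    refine ⟨k.minFac, by nlinarith [hsq], hmf, by nlinarith [hsq], Nat.minFac_dvd k⟩
  · rintro ⟨q, hq1, hq2, hq3, hq4⟩
    have h2q := hq2.two_le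
    exact ⟨q, hq1, h2q, by nlinarith, hq4⟩

theorem alg_2_eq_alt (xs : List Bool) (hpre : 2 ≤ xs.length) : alg_2 xs = alg_2_alt xs := by
  have hm : xs.length = xs.length := rfl
  set m := xs.length with hmdef
  have hntn : (((m : Int) - 1) + 1).toNat = m := by omega
  -- the sieve result
  have hrep : (List.replicate (((m : Int) - 1) + 1).toNat true).length = m := by
    rw [List.length_replicate, hntn]
  have hsieve : ∀ k, k < m →
      (alg2SieveB ((m : Int) - 1) 2 (List.replicate (((m : Int) - 1) + 1).toNat true))[k]? =
        some (!pvPComp k) := by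
    intro k hk
    apply alg2SieveB_getElem? ((m : Int) - 1) 2 (le_refl 2)
    · rw [hrep]; omega
    · intro k' hk'
      rw [hrep] at hk'
      rw [List.getElem?_replicate, if_pos (by rw [hntn]; exact hk')]
      have : pvBM 2 k' = false := by
        simp only [pvBM, decide_eq_false_iff_not]
        rintro ⟨q, hq1, hq2, -, -⟩
        interval_cases q
        · exact Nat.not_prime_zero hq2
        · exact Nat.not_prime_one hq2
      rw [this]; rfl
    · rw [hrep]; exact hk
  have hslen : (alg2SieveB ((m : Int) - 1) 2 (List.replicate (((m : Int) - 1) + 1).toNat true)).length = m := by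
    rw [alg2SieveB_length, hrep]
  apply List.ext_getElem?
  intro k
  by_cases hk : k < m
  · -- A side
    have hc2len : ((xs.set 0 false).set 1 false).length = m := by simp [← hmdef]
    have hA : (alg_2 xs)[k]? =
        if ∃ d, d < k ∧ 2 ≤ d ∧ 2 * d ≤ k ∧ d ∣ k
        then ((xs.set 0 false).set 1 false)[k]?.map (fun _ => false)
        else ((xs.set 0 false).set 1 false)[k]? := by
      rw [alg_2, alg2OuterA_getElem? (m - 1) 2 (le_refl 2) _ k (by omega)]
    -- B side
    have hB : (alg_2_alt xs)[k]? =
        some (xs[k]'hk && !pvPComp k && decide ((2:Int) ≤ (k:Int))) := by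
      rw [alg_2_alt]
      rw [List.getElem?_map, PySem.List.getElem?_enumerate,
          List.getElem?_eq_getElem hk]
      simp only [Option.map_some, zero_add, Int.toNat_natCast]
      rw [List.getD_eq_getElem?_getD, hsieve k hk]
      rfl
    rw [hA, hB]
    by_cases hk2 : k < 2
    · have hP : pvPComp k = false := by
        simp only [pvPComp, decide_eq_false_iff_not]
        rintro ⟨q, hq1, hq2, -, -⟩
        have := hq2.two_le
        omega
      have hcond : ¬ ∃ d, d < k ∧ 2 ≤ d ∧ 2 * d ≤ k ∧ d ∣ k := by
        rintro ⟨d, h1, h2, -, -⟩; omega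
      rw [if_neg hcond]
      have hc2 : ((xs.set 0 false).set 1 false)[k]? = some false := by
        interval_cases k
        · rw [List.getElem?_set_ne (by omega), List.getElem?_set_self (by omega)]
        · rw [List.getElem?_set_self (by simp; omega)]
      rw [hc2]
      have : decide ((2:Int) ≤ (k:Int)) = false := by simp; omega
      rw [this]
      simp
    · have hc2 : ((xs.set 0 false).set 1 false)[k]? = some (xs[k]'hk) := by
        rw [List.getElem?_set_ne (by omega), List.getElem?_set_ne (by omega),
            List.getElem?_eq_getElem hk]
      have hd2 : decide ((2:Int) ≤ (k:Int)) = true := by simp; omega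
      rw [hc2, hd2]
      by_cases hP : ∃ d, d < k ∧ 2 ≤ d ∧ 2 * d ≤ k ∧ d ∣ k
      · have hPc : pvPComp k = true := by rw [← pvAComp_eq_pvPComp, pvAComp]; exact decide_eq_true hP
        rw [if_pos hP, hPc]
        simp
      · have hPc : pvPComp k = false := by
          rw [← pvAComp_eq_pvPComp, pvAComp]; exact decide_eq_false hP
        rw [if_neg hP, hPc]
        simp
  · -- out of range: both none
    have h1 : (alg_2 xs).length = m := by
      rw [alg_2, alg2OuterA_length]; simp [← hmdef]
    have h2 : (alg_2_alt xs).length = m := by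
      rw [alg_2_alt]
      simp [PySem.List.length_enumerate, ← hmdef]
    rw [List.getElem?_eq_none (by omega), List.getElem?_eq_none (by omega)]


-- ===== VERDICT (by name: the statement is the Claim_ definition above) =====
theorem alg_2_spec : Claim_equal_alg_2 := by
  intro c _ hpre
  unfold Spec_alg_2
  exact alg_2_eq_alt c hpre
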